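-- pv_equiv track=rewrite | github.com/hermesespinola/gym_melee | reglas.py | reward_combos
-- ===== SOURCE A (Python) =====
-- def reward_combos(this_player, opponent):
--     """ Count rewards for combos """
--     # TODO Checar si hitstun comienza con hit o depues de hitlag
--     combos = []
--     current = None
--     for i in range(len(this_player)):
--         if current is None:
--             current = {
--                 'percent': 0,
--                 'hits': 0,
--                 'ends_offstage': False,
--                 'kills': False
--             }
--
--         pf = this_player[i]
--         of = opponent[i]
--
--         if of['percent'] > 0 and of['hitlag_left'] > 0:
--             current['percent'] += of['percent']
--             current['hits'] += 1
--
--         if of['stock'] == -1: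
--             current['kills'] = True
--
--         if of['hitstun_left'] == 0:
--             current['ends_offstage'] = of['off_stage']
--             if current['hits'] > 1:
--                 combos.append(current)
--             current = None
--     reward = 0
--     for curr in combos:
--         reward += curr['percent']
--         if curr['ends_offstage']:
--             reward += 3
--         reward += curr['hits']
--         if curr['kills']:
--             reward += 10
--     return reward
-- ===== SOURCE B (Python) =====
-- def reward_combos(this_player, opponent):
--     """ Count rewards for combos: single pass, accumulate reward inline """
--     reward = 0
--     percent = 0
--     hits = 0
--     kills = False
--     for pf, of in zip(this_player, opponent):
--         if of['percent'] > 0 and of['hitlag_left'] > 0: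
--             percent += of['percent']
--             hits += 1
--         if of['stock'] == -1:
--             kills = True
--         if of['hitstun_left'] == 0:
--             if hits > 1:
--                 reward += percent + hits + (3 if of['off_stage'] else 0) + (10 if kills else 0)
--             percent = 0
--             hits = 0
--             kills = False
--     return reward
-- ===== Notes on version B (the rewrite author's own statement) =====
-- stated objective: simpler
-- what changed: Fuses the two phases into one pass: the intermediate combos list is eliminated and the reward is accumulated inline from scalar combo state (percent, hits, kills) as each combo closes; iteration is by zip instead of index.
import Mathlib
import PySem

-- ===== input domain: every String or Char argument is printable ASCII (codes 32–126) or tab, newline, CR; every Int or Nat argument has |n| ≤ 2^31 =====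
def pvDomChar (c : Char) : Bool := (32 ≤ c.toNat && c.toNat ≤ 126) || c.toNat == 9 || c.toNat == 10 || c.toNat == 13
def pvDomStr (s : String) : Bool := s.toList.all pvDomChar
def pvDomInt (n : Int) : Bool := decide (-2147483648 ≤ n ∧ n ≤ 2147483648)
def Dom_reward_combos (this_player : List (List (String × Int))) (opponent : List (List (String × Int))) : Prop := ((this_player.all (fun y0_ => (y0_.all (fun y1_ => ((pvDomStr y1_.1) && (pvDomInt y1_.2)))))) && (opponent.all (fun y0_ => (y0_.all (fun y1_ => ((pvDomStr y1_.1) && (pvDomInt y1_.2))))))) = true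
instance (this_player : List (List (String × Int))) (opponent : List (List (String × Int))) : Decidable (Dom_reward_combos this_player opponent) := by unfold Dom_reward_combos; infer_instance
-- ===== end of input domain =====

-- B fuses A's two phases (build combos list, then sum) into one inline-accumulating pass over zipped frames.


-- ===== PORT A =====
-- first-match/overwrite lookup on a frame, as Python's dict (built from the assoc list) behaves
def rcGetD (of : List (String × Int)) (k : String) (d : Int) : Int :=
  PySem.Dict.getD (PySem.Dict.ofList of) k d
def rcHas (of : List (String × Int)) (k : String) : Bool :=
  (PySem.Dict.get? (PySem.Dict.ofList of) k).isSome

-- A's per-combo dict {'percent','hits','ends_offstage','kills'}.  'ends_offstage' starts as False and is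
-- only ever assigned the int of['off_stage'] before a combo can be appended; only its truthiness is read,
-- so it is stored as an Int (False = 0, truthiness = ≠ 0) — exact for the values A can observe.
structure ComboA where
  percent : Int
  hits : Int
  ends_offstage : Int
  kills : Bool
deriving DecidableEq, Repr

-- one iteration of A's for-loop body, on state (combos, current); `current is None` check folded into getD
def rcStepA (st : List ComboA × Option ComboA) (of : List (String × Int)) :
    List ComboA × Option ComboA :=
  let c0 := st.2.getD ⟨0, 0, 0, false⟩
  let c1 := if rcGetD of "percent" 0 > 0 ∧ rcGetD of "hitlag_left" 0 > 0 then
      { c0 with percent := c0.percent + rcGetD of "percent" 0, hits := c0.hits + 1 }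
    else c0
  let c2 := if rcGetD of "stock" 0 = -1 then { c1 with kills := true } else c1
  if rcGetD of "hitstun_left" 0 = 0 then
    let c3 := { c2 with ends_offstage := rcGetD of "off_stage" 0 }
    (if c3.hits > 1 then st.1 ++ [c3] else st.1, none)
  else (st.1, some c2)

-- A's second loop: reward accumulation over the combos list
def rcSumA (combos : List ComboA) : Int :=
  combos.foldl (fun reward curr =>
    (((reward + curr.percent) + if curr.ends_offstage ≠ 0 then 3 else 0) + curr.hits) +
      if curr.kills then 10 else 0) 0

def reward_combos (this_player : List (List (String × Int))) (opponent : List (List (String × Int))) : Int :=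
  -- for i in range(len(this_player)): of = opponent[i]  (getD totalizes the IndexError, excluded by Pre_)
  rcSumA ((PySem.List.pyRange 0 this_player.length 1).foldl
      (fun st i => rcStepA st (PySem.List.pyGetD opponent i []))
      (([] : List ComboA), (none : Option ComboA))).1

-- ===== PORT B =====
-- one iteration of B's fused loop, on state (reward, percent, hits, kills)
def rcStepB (st : Int × Int × Int × Bool) (of : List (String × Int)) : Int × Int × Int × Bool :=
  let st1 := if rcGetD of "percent" 0 > 0 ∧ rcGetD of "hitlag_left" 0 > 0 then
      (st.1, st.2.1 + rcGetD of "percent" 0, st.2.2.1 + 1, st.2.2.2)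
    else st
  let st2 := if rcGetD of "stock" 0 = -1 then (st1.1, st1.2.1, st1.2.2.1, true) else st1
  if rcGetD of "hitstun_left" 0 = 0 then
    (if st2.2.2.1 > 1 then
        st2.1 + st2.2.1 + st2.2.2.1 + (if rcGetD of "off_stage" 0 ≠ 0 then 3 else 0) +
          (if st2.2.2.2 then 10 else 0)
      else st2.1, 0, 0, false)
  else st2

def reward_combos_alt (this_player : List (List (String × Int))) (opponent : List (List (String × Int))) : Int :=
  ((this_player.zip opponent).foldl (fun st p => rcStepB st p.2) ((0 : Int), (0 : Int), (0 : Int), false)).1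

-- ===== PRECONDITION & SPEC =====
-- Pre_ excludes exactly the inputs where A raises: IndexError when opponent is shorter than this_player,
-- and KeyError when a used opponent frame lacks a key A actually reads (respecting the short-circuit of
-- `of['percent'] > 0 and of['hitlag_left'] > 0`, and that 'off_stage' is read only when hitstun_left == 0).
def Pre_reward_combos (this_player : List (List (String × Int))) (opponent : List (List (String × Int))) : Prop :=
  this_player.length ≤ opponent.length ∧
  ∀ of ∈ opponent.take this_player.length,
    rcHas of "percent" = true ∧
    (rcGetD of "percent" 0 > 0 → rcHas of "hitlag_left" = true) ∧
    rcHas of "stock" = true ∧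
    rcHas of "hitstun_left" = true ∧
    (rcGetD of "hitstun_left" 0 = 0 → rcHas of "off_stage" = true)
instance (this_player : List (List (String × Int))) (opponent : List (List (String × Int))) : Decidable (Pre_reward_combos this_player opponent) := by unfold Pre_reward_combos; infer_instance

def pvWitness_reward_combos : (List (List (String × Int))) × (List (List (String × Int))) :=
  ([[("c", 1)], [("c", 2)]],
   [[("percent", 5), ("hitlag_left", 1), ("stock", 0), ("hitstun_left", 2)],
    [("percent", 6), ("hitlag_left", 1), ("stock", 0), ("hitstun_left", 0), ("off_stage", 1)]])

def Spec_reward_combos (this_player : List (List (String × Int))) (opponent : List (List (String × Int))) (out : Int) : Prop := out = reward_combos_alt this_player opponent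
instance (this_player : List (List (String × Int))) (opponent : List (List (String × Int))) (out : Int) : Decidable (Spec_reward_combos this_player opponent out) := by unfold Spec_reward_combos; infer_instance

-- ===== CLAIM (what is proved, stated in full; the proofs are below) =====
def Claim_equal_reward_combos : Prop := ∀ (this_player : List (List (String × Int))) (opponent : List (List (String × Int))), Dom_reward_combos this_player opponent → Pre_reward_combos this_player opponent → Spec_reward_combos this_player opponent (reward_combos this_player opponent)

-- ===== LEMMAS AND PROOFS =====

-- the coupling invariant between A's state and B's state
def rcInv (a : List ComboA × Option ComboA) (b : Int × Int × Int × Bool) : Prop :=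
  b.1 = rcSumA a.1 ∧
  b.2.1 = (a.2.getD ⟨0, 0, 0, false⟩).percent ∧
  b.2.2.1 = (a.2.getD ⟨0, 0, 0, false⟩).hits ∧
  b.2.2.2 = (a.2.getD ⟨0, 0, 0, false⟩).kills

lemma rcSumA_append (cs : List ComboA) (c : ComboA) :
    rcSumA (cs ++ [c]) =
      (((rcSumA cs + c.percent) + if c.ends_offstage ≠ 0 then 3 else 0) + c.hits) +
        if c.kills then 10 else 0 := by
  simp [rcSumA, List.foldl_append]

lemma rcStep_inv (a : List ComboA × Option ComboA) (b : Int × Int × Int × Bool)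
    (of : List (String × Int)) (h : rcInv a b) : rcInv (rcStepA a of) (rcStepB b of) := by
  obtain ⟨a1, a2⟩ := a
  obtain ⟨br, bp, bh, bk⟩ := b
  obtain ⟨h1, h2, h3, h4⟩ := h
  simp only at h1 h2 h3 h4
  subst h1 h2 h3 h4
  simp only [rcStepA, rcStepB, rcInv]
  split_ifs <;>
    simp_all [rcSumA_append, Option.getD] <;>
    (try cases a2) <;>
    simp_all <;> ring

lemma rcFold_inv (l : List (List (String × Int))) (a : List ComboA × Option ComboA)
    (b : Int × Int × Int × Bool) (h : rcInv a b) :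
    rcInv (l.foldl rcStepA a) (l.foldl rcStepB b) := by
  induction l generalizing a b with
  | nil => exact h
  | cons x t ih => exact ih _ _ (rcStep_inv a b x h)

lemma rcFoldlCongr {α β : Type} (l : List α) (f g : β → α → β) (init : β)
    (h : ∀ x ∈ l, ∀ a, f a x = g a x) : l.foldl f init = l.foldl g init := by
  induction l generalizing init with
  | nil => rfl
  | cons x t ih =>
    simp only [List.foldl_cons, h x (List.mem_cons_self), ih _ (fun y hy a => h y (List.mem_cons_of_mem _ hy) a)]

lemma rcSndZipTake {α β : Type} : ∀ (l1 : List α) (l2 : List β), l1.length ≤ l2.length →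
    (l1.zip l2).map Prod.snd = l2.take l1.length
  | [], _, _ => by simp
  | _ :: _, [], h => by simp at h
  | a :: t1, b :: t2, h => by
    simp only [List.zip_cons_cons, List.map_cons, List.length_cons, List.take_succ_cons]
    rw [rcSndZipTake t1 t2 (by simpa using h)]

-- ===== VERDICT (by name: the statement is the Claim_ definition above) =====
theorem reward_combos_spec : Claim_equal_reward_combos := by
  intro tp op _ hpre
  obtain ⟨hlen, _⟩ := hpre
  unfold Spec_reward_combos reward_combos reward_combos_alt
  -- rewrite A's index loop as a fold over opponent.take tp.length
  have htake : (op.take tp.length).length = tp.length := by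
    simp [List.length_take]; omega
  have hA : (PySem.List.pyRange 0 (tp.length : Int) 1).foldl
      (fun st i => rcStepA st (PySem.List.pyGetD op i [])) (([] : List ComboA), (none : Option ComboA))
      = (op.take tp.length).foldl rcStepA (([] : List ComboA), (none : Option ComboA)) := by
    rw [show ((tp.length : Int)) = ((op.take tp.length).length : Int) by rw [htake]]
    rw [← PySem.List.foldl_pyRange_zero_pyGetD' (op.take tp.length) [] rcStepA]
    apply rcFoldlCongr
    intro i hi st
    rw [PySem.List.mem_pyRange_one] at hi
    have h0 : 0 ≤ i := hi.1
    have h1 : i < ((op.take tp.length).length : Int) := hi.2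
    have h2 : i < (op.length : Int) := by
      rw [htake] at h1
      have : tp.length ≤ op.length := hlen
      omega
    congr 1
    rw [PySem.List.pyGetD_eq_getElem (op.take tp.length) [] h0 h1,
        PySem.List.pyGetD_eq_getElem op [] h0 h2]
    rw [List.getElem_take]
  -- rewrite B's zip loop as the same fold
  have hzip : (tp.zip op).map Prod.snd = op.take tp.length := rcSndZipTake tp op hlen
  have hB : (tp.zip op).foldl (fun st p => rcStepB st p.2) ((0 : Int), (0 : Int), (0 : Int), false)
      = (op.take tp.length).foldl rcStepB ((0 : Int), (0 : Int), (0 : Int), false) := by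
    rw [← hzip, List.foldl_map]
  rw [hA, hB]
  exact (rcFold_inv (op.take tp.length) (([] : List ComboA), (none : Option ComboA))
      ((0 : Int), (0 : Int), (0 : Int), false) (by simp [rcInv, rcSumA])).1.symm
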